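-- pv_equiv track=rewrite | github.com/josephhewi/Games | EulerProject/Largest product in a grid.py | searchDiag
-- ===== SOURCE A (Python) =====
-- def listProd(array):
--     if 0 in array:
--         return(0)
--     else:
--         product = 1
--         for number in array:
--             product*=number
--         return(product)
--
-- def searchDiag(mat,length):
--     high = 0
--     highArray = []
--     testLine1 = [i for i in range(0,length)]
--     testLine2 = [i for i in range(0,length)]
--
--     for i in range(0,len(mat)-length+1):
--
--         for j in range(length-1,len(mat[0])-length+1):
--
--
--             for k in range(length):
--                 testLine1[k] = mat[i+k][j+k]
--                 testValue1 = listProd(testLine1)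
--             if testValue1 > high:
--                 high = testValue1
--                 highArray = testLine1[:]
--
--
--             for k in range(length):
--                 testLine2[k] = mat[i+k][j-k]
--                 testValue2 = listProd(testLine2)
--             if testValue2 > high:
--                 high = testValue2
--                 highArray = testLine2[:]
--
--
--     return(high,highArray)
-- ===== SOURCE B (Python) =====
-- def searchDiag(mat, length):
--     # Overlap recurrence: each diagonal window's product is derived from the
--     # window one step up the same diagonal (shared by length-1 cells), tracked as a
--     # (zero-count, product-of-nonzeros) pair so zeros never poison the division.
--     # Only the best position is remembered; its window is materialized once at the end.
--     rows = len(mat)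
--     cols = len(mat[0]) if mat else 0
--     state = {}  # (i, j, s) -> (zeros in window, product of its nonzero cells)
--     best = 0
--     bestpos = None
--     for i in range(rows - length + 1):
--         for j in range(length - 1, cols - length + 1):
--             for s in (1, -1):
--                 prev = state.get((i - 1, j - s, s))
--                 if prev is None:
--                     z, nz = 0, 1
--                     for k in range(length):
--                         x = mat[i + k][j + s * k]
--                         if x == 0:
--                             z += 1
--                         else:
--                             nz *= x
--                 else:
--                     z, nz = prev
--                     x = mat[i - 1][j - s]                      # cell leaving the window
--                     if x == 0:
--                         z -= 1
--                     else:
--                         nz //= x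
--                     y = mat[i + length - 1][j + s * (length - 1)]  # cell entering
--                     if y == 0:
--                         z += 1
--                     else:
--                         nz *= y
--                 state[(i, j, s)] = (z, nz)
--                 p = 0 if z else nz
--                 if p > best:
--                     best = p
--                     bestpos = (i, j, s)
--     if bestpos is None:
--         return (best, [])
--     i, j, s = bestpos
--     return (best, [mat[i + k][j + s * k] for k in range(length)])
-- ===== Notes on version B (the rewrite author's own statement) =====
-- stated objective: alternative
-- what changed: B replaces A's per-window product recomputation by an overlap recurrence: each window's product is derived from the overlapping window one step up the same diagonal, carried as a (zero-count, nonzero-product) pair in a dict keyed by position, and only the best position is remembered, its window materialized once at the end (O(rows*cols) vs A's O(rows*cols*length^2); measured about 1.4x on the timing inputs, below the 1.5x bar, so not claimed as faster).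
import Mathlib
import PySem

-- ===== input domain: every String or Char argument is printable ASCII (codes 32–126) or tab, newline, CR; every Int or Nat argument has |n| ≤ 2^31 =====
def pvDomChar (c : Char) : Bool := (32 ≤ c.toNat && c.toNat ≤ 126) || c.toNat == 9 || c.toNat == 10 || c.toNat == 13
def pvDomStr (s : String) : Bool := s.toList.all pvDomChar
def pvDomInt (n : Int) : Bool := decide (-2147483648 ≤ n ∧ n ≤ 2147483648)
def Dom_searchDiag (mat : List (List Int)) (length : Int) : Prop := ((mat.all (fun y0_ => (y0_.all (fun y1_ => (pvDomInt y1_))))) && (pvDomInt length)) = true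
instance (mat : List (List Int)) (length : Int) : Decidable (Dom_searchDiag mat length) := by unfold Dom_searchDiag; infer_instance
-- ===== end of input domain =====

-- B replaces A's per-window product recomputation by an overlap recurrence: each
-- window's product comes from the overlapping window one step up the same
-- diagonal, tracked as a (zero-count, nonzero-product) pair in a dict keyed by
-- position; only the best position is remembered and its window is built at the end.

-- ===== PORT A =====
def listProd (array : List Int) : Int :=
  if array.contains 0 then 0
  else array.foldl (fun product number => product * number) 1

-- the body of A's inner (i, j) loop; state = (high, highArray, testLine1, testValue1,
-- testLine2, testValue2).  Python's testValue1/testValue2 are first assigned inside the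
-- k-loop (Pre_ guarantees length ≥ 1, so they are always assigned before being read);
-- 0 is their placeholder in the initial state.
def windowA (mat : List (List Int)) (length i j : Int)
    (st : Int × List Int × List Int × Int × List Int × Int) :
    Int × List Int × List Int × Int × List Int × Int :=
  let (high, highArray, testLine1, testValue1, testLine2, testValue2) := st
  let (testLine1, testValue1) :=
    (PySem.List.pyRange 0 length 1).foldl
      (fun (p : List Int × Int) k =>
        let t := PySem.List.pySetD p.1 k
          (PySem.List.pyGetD (PySem.List.pyGetD mat (i + k) []) (j + k) 0)
        (t, listProd t))
      (testLine1, testValue1)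
  let (high, highArray) :=
    if testValue1 > high then (testValue1, testLine1) else (high, highArray)
  let (testLine2, testValue2) :=
    (PySem.List.pyRange 0 length 1).foldl
      (fun (p : List Int × Int) k =>
        let t := PySem.List.pySetD p.1 k
          (PySem.List.pyGetD (PySem.List.pyGetD mat (i + k) []) (j - k) 0)
        (t, listProd t))
      (testLine2, testValue2)
  let (high, highArray) :=
    if testValue2 > high then (testValue2, testLine2) else (high, highArray)
  (high, highArray, testLine1, testValue1, testLine2, testValue2)

def searchDiag (mat : List (List Int)) (length : Int) : Int × List Int :=
  let init : Int × List Int × List Int × Int × List Int × Int :=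
    (0, [], PySem.List.pyRange 0 length 1, 0, PySem.List.pyRange 0 length 1, 0)
  let res :=
    (PySem.List.pyRange 0 ((mat.length : Int) - length + 1) 1).foldl
      (fun st i =>
        (PySem.List.pyRange (length - 1) (((mat.headD []).length : Int) - length + 1) 1).foldl
          (fun st j => windowA mat length i j st) st)
      init
  (res.1, res.2.1)

-- ===== PORT B =====
-- (in-range reads mat[i+k][j+s*k] etc. are ported with pyGetD _ _ 0; under Pre_ every
-- index B reads is in range, so the default is never taken)
def searchDiag_alt (mat : List (List Int)) (length : Int) : Int × List Int :=
  let rows : Int := (mat.length : Int)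
  let cols : Int := if mat = [] then 0 else ((mat.headD []).length : Int)
  let res :=
    (PySem.List.pyRange 0 (rows - length + 1) 1).foldl (fun st i =>
      (PySem.List.pyRange (length - 1) (cols - length + 1) 1).foldl (fun st j =>
        ([1, -1] : List Int).foldl (fun st s =>
          let (state, best, bestpos) := st
          let (z, nz) :=
            match state.get? (i - 1, j - s, s) with
            | none =>
              (PySem.List.pyRange 0 length 1).foldl (fun (p : Int × Int) k =>
                let x := PySem.List.pyGetD (PySem.List.pyGetD mat (i + k) []) (j + s * k) 0
                if x = 0 then (p.1 + 1, p.2) else (p.1, p.2 * x)) ((0 : Int), (1 : Int))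
            | some zn =>
              let x := PySem.List.pyGetD (PySem.List.pyGetD mat (i - 1) []) (j - s) 0
              let (z, nz) := if x = 0 then (zn.1 - 1, zn.2) else (zn.1, PySem.Int.floordiv zn.2 x)
              let y := PySem.List.pyGetD (PySem.List.pyGetD mat (i + length - 1) []) (j + s * (length - 1)) 0
              if y = 0 then (z + 1, nz) else (z, nz * y)
          let state := state.insert (i, j, s) (z, nz)
          let p := if z ≠ 0 then 0 else nz
          if p > best then (state, p, some (i, j, s)) else (state, best, bestpos)) st) st)
      ((PySem.Dict.empty : PySem.Dict (Int × Int × Int) (Int × Int)), (0 : Int),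
       (none : Option (Int × Int × Int)))
  match res.2.2 with
  | none => (res.2.1, [])
  | some pos =>
    (res.2.1, (PySem.List.pyRange 0 length 1).map (fun k =>
      PySem.List.pyGetD (PySem.List.pyGetD mat (pos.1 + k) []) (pos.2.1 + pos.2.2 * k) 0))

-- ===== PRECONDITION & SPEC =====
-- Pre_ is exactly the set of inputs on which the Python A returns normally:
-- length ≥ 1 (otherwise testValue1 is read unassigned → NameError, or mat[0] is taken
-- on an empty mat → IndexError), and either no window exists (fewer than `length` rows,
-- or fewer than 2*length-1 columns in row 0) or every row r is at least as long as the
-- last cell the scan reads in it (column cols - length + min r (length-1)); otherwise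
-- A raises IndexError on a too-short row.
def Pre_searchDiag (mat : List (List Int)) (length : Int) : Prop :=
  1 ≤ length ∧
  ((mat.length : Int) < length ∨ ((mat.headD []).length : Int) < 2 * length - 1 ∨
    ∀ p ∈ mat.zipIdx,
      ((mat.headD []).length : Int) - length + 1 + min (p.2 : Int) (length - 1) ≤ (p.1.length : Int))
instance (mat : List (List Int)) (length : Int) : Decidable (Pre_searchDiag mat length) := by
  unfold Pre_searchDiag; infer_instance

def pvWitness_searchDiag : List (List Int) × Int := ([[1, 2, 3], [4, 5, 6], [7, 8, 9]], 2)

def Spec_searchDiag (mat : List (List Int)) (length : Int) (out : Int × List Int) : Prop := out = searchDiag_alt mat length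
instance (mat : List (List Int)) (length : Int) (out : Int × List Int) : Decidable (Spec_searchDiag mat length out) := by unfold Spec_searchDiag; infer_instance

-- ===== CLAIM (what is proved, stated in full; the proofs are below) =====
def Claim_equal_searchDiag : Prop := ∀ (mat : List (List Int)) (length : Int), Dom_searchDiag mat length → Pre_searchDiag mat length → Spec_searchDiag mat length (searchDiag mat length)

-- ===== LEMMAS AND PROOFS =====

def prodList (d : List Int) : Int := d.foldl (fun p x => p * x) 1

-- both Pythons' products are List.prod
theorem foldl_mul_eq_prod (d : List Int) : ∀ a : Int, d.foldl (fun p x => p * x) a = a * d.prod := by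
  induction d with
  | nil => intro a; simp
  | cons x t ih => intro a; simp [List.foldl_cons, ih, List.prod_cons, mul_assoc]

theorem listProd_eq_prodList (d : List Int) : listProd d = prodList d := by
  unfold listProd prodList
  split_ifs with h
  · have h0 : (0 : Int) ∈ d := by simpa using h
    rw [foldl_mul_eq_prod, List.prod_eq_zero h0, mul_zero]
  · rfl

-- range(0, L) in Nat-indexed form
def pvR0 (n : Nat) : List Int := (List.range n).map (fun k : Nat => (k : Int))

theorem pyRange0 (L : Int) : PySem.List.pyRange 0 L 1 = pvR0 L.toNat := by
  rw [PySem.List.pyRange_one]; simp [pvR0]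

-- A's k-loop fills the buffer: the fold of writes is the mapped window, the carried
-- value its product
theorem fill_aux (f : Int → Int) : ∀ (m : Nat) (t : List Int) (v : Int), m ≤ t.length →
    (pvR0 m).foldl
      (fun (p : List Int × Int) k =>
        let t' := PySem.List.pySetD p.1 k (f k)
        (t', listProd t'))
      (t, v)
    = ((List.range m).map (fun n : Nat => f (n : Int)) ++ t.drop m,
       if m = 0 then v else listProd ((List.range m).map (fun n : Nat => f (n : Int)) ++ t.drop m)) := by
  intro m
  induction m with
  | zero => intro t v _; simp [pvR0]
  | succ m ih =>
    intro t v hm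
    have hm' : m ≤ t.length := by omega
    have hmlt : m < t.length := by omega
    rw [pvR0, List.range_succ, List.map_append, ← pvR0, List.foldl_append, ih t v hm']
    have hset :
        PySem.List.pySetD ((List.range m).map (fun n : Nat => f (n : Int)) ++ t.drop m) ((m : Nat) : Int) (f ((m : Nat) : Int))
          = (List.range (m + 1)).map (fun n : Nat => f (n : Int)) ++ t.drop (m + 1) := by
      simp only [PySem.List.pySetD_natCast]
      rw [List.set_append_right _ _ (by simp)]
      have hd : (List.drop m t).set 0 (f (m : Int)) = f (m : Int) :: List.drop (m + 1) t := by
        rw [List.drop_eq_getElem_cons hmlt, List.set_cons_zero]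
      simp only [List.length_map, List.length_range, Nat.sub_self]
      rw [hd, List.range_succ, List.map_append, List.append_assoc]
      rfl
    simp only [List.map_cons, List.map_nil, List.foldl_cons, List.foldl_nil]
    simp only [hset]
    have hnz : m + 1 ≠ 0 := by omega
    simp [List.range_succ]

theorem fill_fold (f : Int → Int) (L : Int) (hL : 1 ≤ L) (t : List Int) (v : Int)
    (ht : t.length = L.toNat) :
    (PySem.List.pyRange 0 L 1).foldl
      (fun (p : List Int × Int) k =>
        let t' := PySem.List.pySetD p.1 k (f k)
        (t', listProd t'))
      (t, v)
    = ((List.range L.toNat).map (fun n : Nat => f (n : Int)),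
       listProd ((List.range L.toNat).map (fun n : Nat => f (n : Int)))) := by
  rw [pyRange0, fill_aux f L.toNat t v (by omega)]
  have hnz : L.toNat ≠ 0 := by omega
  have hdrop : List.drop L.toNat t = [] := by
    apply List.drop_eq_nil_of_le; omega
  simp [hdrop, hnz]

-- the two diagonal windows of A at (i, j), and all candidates (product, window) in
-- A's scan order
def pvWin1 (mat : List (List Int)) (L i j : Int) : List Int :=
  (List.range L.toNat).map (fun n : Nat =>
    PySem.List.pyGetD (PySem.List.pyGetD mat (i + (n : Int)) []) (j + (n : Int)) 0)
def pvWin2 (mat : List (List Int)) (L i j : Int) : List Int :=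
  (List.range L.toNat).map (fun n : Nat =>
    PySem.List.pyGetD (PySem.List.pyGetD mat (i + (n : Int)) []) (j - (n : Int)) 0)

def pvCands (mat : List (List Int)) (L : Int) : List (Int × List Int) :=
  (PySem.List.pyRange 0 ((mat.length : Int) - L + 1) 1).flatMap (fun i =>
    (PySem.List.pyRange (L - 1) (((mat.headD []).length : Int) - L + 1) 1).flatMap (fun j =>
      [(prodList (pvWin1 mat L i j), pvWin1 mat L i j),
       (prodList (pvWin2 mat L i j), pvWin2 mat L i j)]))

-- the 'keep the strictly larger candidate' update
def pvStep (pr pd : Int × List Int) : Int × List Int :=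
  if pd.1 > pr.1 then (pd.1, pd.2) else pr

-- windowA acts on (high, highArray) as two pvStep applications and keeps buffer lengths
theorem windowA_proj (mat : List (List Int)) (L i j : Int) (hL : 1 ≤ L)
    (h : Int) (a t1 : List Int) (v1 : Int) (t2 : List Int) (v2 : Int)
    (ht1 : t1.length = L.toNat) (ht2 : t2.length = L.toNat) :
    windowA mat L i j (h, a, t1, v1, t2, v2)
    = ((pvStep (pvStep (h, a) (prodList (pvWin1 mat L i j), pvWin1 mat L i j))
          (prodList (pvWin2 mat L i j), pvWin2 mat L i j)).1,
       (pvStep (pvStep (h, a) (prodList (pvWin1 mat L i j), pvWin1 mat L i j))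
          (prodList (pvWin2 mat L i j), pvWin2 mat L i j)).2,
       pvWin1 mat L i j, prodList (pvWin1 mat L i j),
       pvWin2 mat L i j, prodList (pvWin2 mat L i j)) := by
  unfold windowA
  dsimp only
  rw [fill_fold (fun k => PySem.List.pyGetD (PySem.List.pyGetD mat (i + k) []) (j + k) 0) L hL t1 v1 ht1]
  rw [fill_fold (fun k => PySem.List.pyGetD (PySem.List.pyGetD mat (i + k) []) (j - k) 0) L hL t2 v2 ht2]
  dsimp only
  rw [show ((List.range L.toNat).map (fun n : Nat =>
        PySem.List.pyGetD (PySem.List.pyGetD mat (i + (n : Int)) []) (j + (n : Int)) 0)) = pvWin1 mat L i j from rfl,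
      show ((List.range L.toNat).map (fun n : Nat =>
        PySem.List.pyGetD (PySem.List.pyGetD mat (i + (n : Int)) []) (j - (n : Int)) 0)) = pvWin2 mat L i j from rfl,
      listProd_eq_prodList, listProd_eq_prodList]
  simp only [pvStep]

-- projection-through-fold with an invariant
theorem foldl_proj_inv {α β γ : Type} (proj : α → γ) (I : α → Prop)
    (f : α → β → α) (g : γ → β → γ)
    (hf : ∀ a b, I a → I (f a b)) (hp : ∀ a b, I a → proj (f a b) = g (proj a) b) :
    ∀ (l : List β) (a : α), I a → proj (l.foldl f a) = l.foldl g (proj a) ∧ I (l.foldl f a) := by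
  intro l
  induction l with
  | nil => intro a ha; exact ⟨rfl, ha⟩
  | cons x t ih =>
    intro a ha
    have h1 := hf a x ha
    have h2 := hp a x ha
    have h3 := ih (f a x) h1
    simp only [List.foldl_cons]
    exact ⟨by rw [h3.1, h2], h3.2⟩

theorem foldl_flatMap' {α β σ : Type} (g : β → List σ) (f : α → σ → α) :
    ∀ (l : List β) (a : α), (l.flatMap g).foldl f a = l.foldl (fun a x => (g x).foldl f a) a := by
  intro l
  induction l with
  | nil => intro a; simp
  | cons x t ih => intro a; simp [List.flatMap_cons, List.foldl_append, ih]

-- A's whole nested fold is the pvStep fold over the candidate list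
theorem A_eq_step_fold (mat : List (List Int)) (L : Int) (hL : 1 ≤ L) :
    searchDiag mat L = (pvCands mat L).foldl pvStep (0, []) := by
  have hwf : ∀ (i j : Int) (st : Int × List Int × List Int × Int × List Int × Int),
      (st.2.2.1.length = L.toNat ∧ st.2.2.2.2.1.length = L.toNat) →
      ((windowA mat L i j st).2.2.1.length = L.toNat ∧
       (windowA mat L i j st).2.2.2.2.1.length = L.toNat) := by
    rintro i j ⟨h, a, t1, v1, t2, v2⟩ ⟨ht1, ht2⟩
    rw [windowA_proj mat L i j hL h a t1 v1 t2 v2 ht1 ht2]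
    constructor <;> simp [pvWin1, pvWin2]
  have hwp : ∀ (i j : Int) (st : Int × List Int × List Int × Int × List Int × Int),
      (st.2.2.1.length = L.toNat ∧ st.2.2.2.2.1.length = L.toNat) →
      ((windowA mat L i j st).1, (windowA mat L i j st).2.1)
        = pvStep (pvStep (st.1, st.2.1) (prodList (pvWin1 mat L i j), pvWin1 mat L i j))
            (prodList (pvWin2 mat L i j), pvWin2 mat L i j) := by
    rintro i j ⟨h, a, t1, v1, t2, v2⟩ ⟨ht1, ht2⟩
    rw [windowA_proj mat L i j hL h a t1 v1 t2 v2 ht1 ht2]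
  have hinner : ∀ (i : Int) (st : Int × List Int × List Int × Int × List Int × Int),
      (st.2.2.1.length = L.toNat ∧ st.2.2.2.2.1.length = L.toNat) →
      (((PySem.List.pyRange (L - 1) (((mat.headD []).length : Int) - L + 1) 1).foldl
          (fun st j => windowA mat L i j st) st).1,
       ((PySem.List.pyRange (L - 1) (((mat.headD []).length : Int) - L + 1) 1).foldl
          (fun st j => windowA mat L i j st) st).2.1)
        = (PySem.List.pyRange (L - 1) (((mat.headD []).length : Int) - L + 1) 1).foldl
            (fun pr j => pvStep (pvStep pr (prodList (pvWin1 mat L i j), pvWin1 mat L i j))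
              (prodList (pvWin2 mat L i j), pvWin2 mat L i j)) (st.1, st.2.1) ∧
      (((PySem.List.pyRange (L - 1) (((mat.headD []).length : Int) - L + 1) 1).foldl
          (fun st j => windowA mat L i j st) st).2.2.1.length = L.toNat ∧
       ((PySem.List.pyRange (L - 1) (((mat.headD []).length : Int) - L + 1) 1).foldl
          (fun st j => windowA mat L i j st) st).2.2.2.2.1.length = L.toNat) := by
    intro i st hst
    exact foldl_proj_inv (fun st => (st.1, st.2.1))
      (fun st => st.2.2.1.length = L.toNat ∧ st.2.2.2.2.1.length = L.toNat)
      (fun st j => windowA mat L i j st)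
      (fun pr j => pvStep (pvStep pr (prodList (pvWin1 mat L i j), pvWin1 mat L i j))
        (prodList (pvWin2 mat L i j), pvWin2 mat L i j))
      (fun st j h => hwf i j st h) (fun st j h => hwp i j st h) _ st hst
  have houter := foldl_proj_inv (fun st => (st.1, st.2.1))
      (fun st => st.2.2.1.length = L.toNat ∧ st.2.2.2.2.1.length = L.toNat)
      (fun st i => (PySem.List.pyRange (L - 1) (((mat.headD []).length : Int) - L + 1) 1).foldl
          (fun st j => windowA mat L i j st) st)
      (fun pr i => (PySem.List.pyRange (L - 1) (((mat.headD []).length : Int) - L + 1) 1).foldl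
          (fun pr j => pvStep (pvStep pr (prodList (pvWin1 mat L i j), pvWin1 mat L i j))
            (prodList (pvWin2 mat L i j), pvWin2 mat L i j)) pr)
      (fun st i h => (hinner i st h).2) (fun st i h => (hinner i st h).1)
      (PySem.List.pyRange 0 ((mat.length : Int) - L + 1) 1)
      (0, [], PySem.List.pyRange 0 L 1, 0, PySem.List.pyRange 0 L 1, 0)
      (by constructor <;> simp [PySem.List.length_pyRange_one])
  unfold searchDiag
  dsimp only
  dsimp only at houter
  rw [houter.1]
  rw [pvCands, foldl_flatMap']
  simp only [foldl_flatMap']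
  rfl

-- ===== B-side: the overlap recurrence =====

-- the diagonal window at a position key (i, j, s); definitionally B's reconstruction
def pvW (mat : List (List Int)) (L : Int) (key : Int × Int × Int) : List Int :=
  (PySem.List.pyRange 0 L 1).map (fun k =>
    PySem.List.pyGetD (PySem.List.pyGetD mat (key.1 + k) []) (key.2.1 + key.2.2 * k) 0)

theorem pvW_one (mat : List (List Int)) (L i j : Int) :
    pvW mat L (i, j, 1) = pvWin1 mat L i j := by
  rw [pvW, pyRange0, pvR0, List.map_map, pvWin1]
  apply List.map_congr_left
  intro n _
  simp

theorem pvW_negone (mat : List (List Int)) (L i j : Int) :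
    pvW mat L (i, j, -1) = pvWin2 mat L i j := by
  rw [pvW, pyRange0, pvR0, List.map_map, pvWin2]
  apply List.map_congr_left
  intro n _
  simp [← sub_eq_add_neg]

-- zero count (as Int) and product of nonzero cells of a window
def pvZ (mat : List (List Int)) (L : Int) (key : Int × Int × Int) : Int :=
  ((pvW mat L key).count 0 : Int)
def pvN (mat : List (List Int)) (L : Int) (key : Int × Int × Int) : Int :=
  ((pvW mat L key).filter (fun x => x ≠ 0)).prod

-- product of a list from its zero count and nonzero product
theorem prodList_eq_z_n (l : List Int) :
    prodList l = if (l.count 0 : Int) ≠ 0 then 0 else (l.filter (fun x => x ≠ 0)).prod := by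
  unfold prodList
  rw [foldl_mul_eq_prod, one_mul]
  by_cases h : (0 : Int) ∈ l
  · have hc : l.count 0 ≠ 0 := by simpa [List.count_eq_zero] using h
    simp [List.prod_eq_zero h, hc]
  · have hc : l.count 0 = 0 := by simpa [List.count_eq_zero] using h
    have hf : l.filter (fun x => x ≠ 0) = l := by
      apply List.filter_eq_self.mpr
      intro x hx
      exact decide_eq_true (fun h0 => h (h0 ▸ hx))
    rw [if_neg (by simp [hc]), hf]

-- the generic (zeros, nonzero-product) accumulation over a list of cells
theorem zn_fold (l : List Int) : ∀ (z n : Int),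
    l.foldl (fun (p : Int × Int) x => if x = 0 then (p.1 + 1, p.2) else (p.1, p.2 * x)) (z, n)
    = (z + (l.count 0 : Int), n * (l.filter (fun x => x ≠ 0)).prod) := by
  induction l with
  | nil => intro z n; simp
  | cons x t ih =>
    intro z n
    simp only [List.foldl_cons]
    by_cases hx : x = 0
    · subst hx
      rw [if_pos rfl, ih]
      have h1 : (((0 : Int) :: t).count 0 : Int) = (t.count 0 : Int) + 1 := by
        simp
      have h2 : ((0 : Int) :: t).filter (fun x => x ≠ 0) = t.filter (fun x => x ≠ 0) := by
        simp
      rw [h1, h2]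
      have h3 : z + 1 + (t.count 0 : Int) = z + ((t.count 0 : Int) + 1) := by ring
      rw [h3]
    · rw [if_neg hx, ih]
      have h1 : ((x :: t).count 0 : Int) = (t.count 0 : Int) := by
        rw [List.count_cons]
        simp [hx]
      have h2 : (x :: t).filter (fun v => v ≠ 0) = x :: t.filter (fun v => v ≠ 0) := by
        rw [List.filter_cons, if_pos (by simpa using hx)]
      rw [h1, h2, List.prod_cons, mul_assoc]

-- B's fresh-window loop computes (pvZ, pvN)
theorem fresh_eq (mat : List (List Int)) (L i j s : Int) :
    (PySem.List.pyRange 0 L 1).foldl (fun (p : Int × Int) k =>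
      let x := PySem.List.pyGetD (PySem.List.pyGetD mat (i + k) []) (j + s * k) 0
      if x = 0 then (p.1 + 1, p.2) else (p.1, p.2 * x)) ((0 : Int), (1 : Int))
    = (pvZ mat L (i, j, s), pvN mat L (i, j, s)) := by
  have hm : (PySem.List.pyRange 0 L 1).foldl (fun (p : Int × Int) k =>
      let x := PySem.List.pyGetD (PySem.List.pyGetD mat (i + k) []) (j + s * k) 0
      if x = 0 then (p.1 + 1, p.2) else (p.1, p.2 * x)) ((0 : Int), (1 : Int))
      = (pvW mat L (i, j, s)).foldl
          (fun (p : Int × Int) x => if x = 0 then (p.1 + 1, p.2) else (p.1, p.2 * x)) (0, 1) := by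
    rw [pvW, List.foldl_map]
  rw [hm, zn_fold, pvZ, pvN]
  simp

-- the overlap: the window at (i, j, s) shares all but one cell with the one at
-- (i-1, j-s, s): drop its first cell, append the new last cell
theorem shift_eq (mat : List (List Int)) (L i j s : Int) (hL : 1 ≤ L) :
    pvW mat L (i - 1, j - s, s)
      = PySem.List.pyGetD (PySem.List.pyGetD mat (i - 1) []) (j - s) 0 ::
        ((List.range (L.toNat - 1)).map (fun n : Nat =>
          PySem.List.pyGetD (PySem.List.pyGetD mat (i + (n : Int)) []) (j + s * (n : Int)) 0))
    ∧ pvW mat L (i, j, s)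
      = ((List.range (L.toNat - 1)).map (fun n : Nat =>
          PySem.List.pyGetD (PySem.List.pyGetD mat (i + (n : Int)) []) (j + s * (n : Int)) 0))
        ++ [PySem.List.pyGetD (PySem.List.pyGetD mat (i + L - 1) []) (j + s * (L - 1)) 0] := by
  set m := L.toNat - 1 with hmdef
  have hm : L.toNat = m + 1 := by omega
  have hcast : ((m : Nat) : Int) = L - 1 := by omega
  constructor
  · rw [pvW, pyRange0, pvR0, List.map_map, hm, List.range_succ_eq_map, List.map_cons,
      List.map_map]
    dsimp only
    congr 1
    · simp
    · apply List.map_congr_left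
      intro n _
      simp only [Function.comp_apply, Nat.succ_eq_add_one]
      have e1 : i - 1 + ((n + 1 : Nat) : Int) = i + (n : Int) := by push_cast; ring
      have e2 : j - s + s * ((n + 1 : Nat) : Int) = j + s * (n : Int) := by push_cast; ring
      rw [e1, e2]
  · rw [pvW, pyRange0, pvR0, List.map_map, hm, List.range_succ, List.map_append]
    dsimp only
    have hA : (List.range m).map ((fun k : Int =>
        PySem.List.pyGetD (PySem.List.pyGetD mat (i + k) []) (j + s * k) 0) ∘ (fun k : Nat => (k : Int)))
        = (List.range m).map (fun n : Nat =>
            PySem.List.pyGetD (PySem.List.pyGetD mat (i + (n : Int)) []) (j + s * (n : Int)) 0) := by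
      apply List.map_congr_left
      intro n _
      rfl
    rw [hA]
    congr 1
    simp only [List.map_cons, List.map_nil, Function.comp_apply]
    have e1 : i + ((m : Nat) : Int) = i + L - 1 := by omega
    have e2 : j + s * ((m : Nat) : Int) = j + s * (L - 1) := by rw [hcast]
    rw [e1, e2]

-- floor division undoes an exact multiplication
theorem floordiv_mul_cancel (x m : Int) (hx : x ≠ 0) :
    PySem.Int.floordiv (x * m) x = m := by
  have h := PySem.Int.floordiv_mul_add_mod (x * m) x
  have hm : PySem.Int.mod (x * m) x = 0 := by
    rw [PySem.Int.mod_eq_zero_iff_dvd]; exact Dvd.intro m rfl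
  rw [hm, add_zero] at h
  exact mul_right_cancel₀ hx (by rw [h]; ring)

-- the overlap recurrence is exact: B's some-branch update turns the stored
-- (pvZ, pvN) of the previous window into (pvZ, pvN) of the current one
theorem update_eq (mat : List (List Int)) (L i j s : Int) (hL : 1 ≤ L) :
    (let x := PySem.List.pyGetD (PySem.List.pyGetD mat (i - 1) []) (j - s) 0
     let p := if x = 0 then (pvZ mat L (i - 1, j - s, s) - 1, pvN mat L (i - 1, j - s, s))
              else (pvZ mat L (i - 1, j - s, s), PySem.Int.floordiv (pvN mat L (i - 1, j - s, s)) x)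
     let y := PySem.List.pyGetD (PySem.List.pyGetD mat (i + L - 1) []) (j + s * (L - 1)) 0
     if y = 0 then (p.1 + 1, p.2) else (p.1, p.2 * y))
    = (pvZ mat L (i, j, s), pvN mat L (i, j, s)) := by
  obtain ⟨hprev, hcur⟩ := shift_eq mat L i j s hL
  set x := PySem.List.pyGetD (PySem.List.pyGetD mat (i - 1) []) (j - s) 0 with hxdef
  set y := PySem.List.pyGetD (PySem.List.pyGetD mat (i + L - 1) []) (j + s * (L - 1)) 0 with hydef
  set mid := (List.range (L.toNat - 1)).map (fun n : Nat =>
      PySem.List.pyGetD (PySem.List.pyGetD mat (i + (n : Int)) []) (j + s * (n : Int)) 0) with hmid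
  have hZp : pvZ mat L (i - 1, j - s, s) = (if x = 0 then 1 else 0) + (mid.count 0 : Int) := by
    rw [pvZ, hprev, List.count_cons]
    simp only [beq_iff_eq]
    by_cases hx : x = 0
    · simp only [if_pos hx]; push_cast; ring
    · simp only [if_neg hx]; push_cast; ring
  have hNp : pvN mat L (i - 1, j - s, s)
      = (if x = 0 then 1 else x) * (mid.filter (fun v => v ≠ 0)).prod := by
    rw [pvN, hprev, List.filter_cons]
    by_cases hx : x = 0 <;> simp [hx]
  have hZc : pvZ mat L (i, j, s) = (mid.count 0 : Int) + (if y = 0 then 1 else 0) := by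
    rw [pvZ, hcur, List.count_append, List.count_singleton]
    simp only [beq_iff_eq]
    by_cases hy : y = 0
    · simp only [if_pos hy]; push_cast; ring
    · simp only [if_neg hy]; push_cast; ring
  have hNc : pvN mat L (i, j, s)
      = (mid.filter (fun v => v ≠ 0)).prod * (if y = 0 then 1 else y) := by
    rw [pvN, hcur, List.filter_append]
    by_cases hy : y = 0 <;> simp [hy]
  dsimp only
  rw [hZp, hNp, hZc, hNc]
  by_cases hx : x = 0 <;> by_cases hy : y = 0
  · simp only [if_pos hx, if_pos hy]
    simp only [Prod.mk.injEq]
    exact ⟨by ring, by ring⟩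
  · simp only [if_pos hx, if_neg hy]
    simp only [Prod.mk.injEq]
    exact ⟨by ring, by ring⟩
  · simp only [if_neg hx, if_pos hy]
    simp only [Prod.mk.injEq]
    refine ⟨by ring, ?_⟩
    rw [floordiv_mul_cancel _ _ hx]
    ring
  · simp only [if_neg hx, if_neg hy]
    simp only [Prod.mk.injEq]
    refine ⟨by ring, ?_⟩
    rw [floordiv_mul_cancel _ _ hx]

-- running best over keys (B's (best, bestpos) update)
def pvG (mat : List (List Int)) (L : Int) (pr : Int × Option (Int × Int × Int))
    (key : Int × Int × Int) : Int × Option (Int × Int × Int) :=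
  if prodList (pvW mat L key) > pr.1 then (prodList (pvW mat L key), some key) else pr

-- pairing: the pvStep fold over (product, window) pairs is determined by the
-- (best, bestpos) fold over the keys
theorem pair_fold (mat : List (List Int)) (L : Int) :
    ∀ (l : List (Int × Int × Int)) (b : Int) (o : Option (Int × Int × Int)) (a : List Int),
    (match o with | none => a = [] | some k => a = pvW mat L k) →
    (l.map (fun key => (prodList (pvW mat L key), pvW mat L key))).foldl pvStep (b, a)
      = ((l.foldl (pvG mat L) (b, o)).1,
         match (l.foldl (pvG mat L) (b, o)).2 with
         | none => [] | some k => pvW mat L k) := by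
  intro l
  induction l with
  | nil =>
    intro b o a ha
    cases o <;> simp_all
  | cons k t ih =>
    intro b o a ha
    simp only [List.map_cons, List.foldl_cons, pvStep, pvG]
    by_cases hgt : prodList (pvW mat L k) > b
    · simp only [if_pos hgt]
      exact ih _ _ _ rfl
    · simp only [if_neg hgt]
      exact ih _ _ _ ha

-- keys in B's scan order, and pvCands as their (product, window) pairs
def pvKeys (mat : List (List Int)) (L : Int) : List (Int × Int × Int) :=
  (PySem.List.pyRange 0 ((mat.length : Int) - L + 1) 1).flatMap (fun i =>
    (PySem.List.pyRange (L - 1) (((mat.headD []).length : Int) - L + 1) 1).flatMap (fun j =>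
      [(i, j, 1), (i, j, -1)]))

theorem cands_eq_map_keys (mat : List (List Int)) (L : Int) :
    pvCands mat L = (pvKeys mat L).map (fun key => (prodList (pvW mat L key), pvW mat L key)) := by
  rw [pvCands, pvKeys, List.map_flatMap]
  refine List.flatMap_congr ?_
  intro i _
  rw [List.map_flatMap]
  refine List.flatMap_congr ?_
  intro j _
  simp [pvW_one, pvW_negone]

-- B's per-s body, as written in searchDiag_alt
def pvBody (mat : List (List Int)) (L : Int)
    (st : PySem.Dict (Int × Int × Int) (Int × Int) × Int × Option (Int × Int × Int))
    (i j s : Int) :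
    PySem.Dict (Int × Int × Int) (Int × Int) × Int × Option (Int × Int × Int) :=
  let (state, best, bestpos) := st
  let (z, nz) :=
    match state.get? (i - 1, j - s, s) with
    | none =>
      (PySem.List.pyRange 0 L 1).foldl (fun (p : Int × Int) k =>
        let x := PySem.List.pyGetD (PySem.List.pyGetD mat (i + k) []) (j + s * k) 0
        if x = 0 then (p.1 + 1, p.2) else (p.1, p.2 * x)) ((0 : Int), (1 : Int))
    | some zn =>
      let x := PySem.List.pyGetD (PySem.List.pyGetD mat (i - 1) []) (j - s) 0
      let (z, nz) := if x = 0 then (zn.1 - 1, zn.2) else (zn.1, PySem.Int.floordiv zn.2 x)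
      let y := PySem.List.pyGetD (PySem.List.pyGetD mat (i + L - 1) []) (j + s * (L - 1)) 0
      if y = 0 then (z + 1, nz) else (z, nz * y)
  let state := state.insert (i, j, s) (z, nz)
  let p := if z ≠ 0 then 0 else nz
  if p > best then (state, p, some (i, j, s)) else (state, best, bestpos)

-- the dict invariant: every stored pair is the (pvZ, pvN) of its key
def pvInv (mat : List (List Int)) (L : Int)
    (st : PySem.Dict (Int × Int × Int) (Int × Int) × Int × Option (Int × Int × Int)) : Prop :=
  ∀ key zn, st.1.get? key = some zn → zn = (pvZ mat L key, pvN mat L key)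

theorem body_proj (mat : List (List Int)) (L : Int) (hL : 1 ≤ L) (i j s : Int)
    (st : PySem.Dict (Int × Int × Int) (Int × Int) × Int × Option (Int × Int × Int))
    (hI : pvInv mat L st) :
    ((pvBody mat L st i j s).2 = pvG mat L st.2 (i, j, s)) ∧ pvInv mat L (pvBody mat L st i j s) := by
  obtain ⟨d, b, o⟩ := st
  have hzn :
      (match d.get? (i - 1, j - s, s) with
        | none =>
          (PySem.List.pyRange 0 L 1).foldl (fun (p : Int × Int) k =>
            let x := PySem.List.pyGetD (PySem.List.pyGetD mat (i + k) []) (j + s * k) 0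
            if x = 0 then (p.1 + 1, p.2) else (p.1, p.2 * x)) ((0 : Int), (1 : Int))
        | some zn =>
          let x := PySem.List.pyGetD (PySem.List.pyGetD mat (i - 1) []) (j - s) 0
          let (z, nz) := if x = 0 then (zn.1 - 1, zn.2) else (zn.1, PySem.Int.floordiv zn.2 x)
          let y := PySem.List.pyGetD (PySem.List.pyGetD mat (i + L - 1) []) (j + s * (L - 1)) 0
          if y = 0 then (z + 1, nz) else (z, nz * y))
      = (pvZ mat L (i, j, s), pvN mat L (i, j, s)) := by
    cases hget : d.get? (i - 1, j - s, s) with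
    | none => exact fresh_eq mat L i j s
    | some zn =>
      have := hI _ _ hget
      subst this
      exact update_eq mat L i j s hL
  have hp : (if (pvZ mat L (i, j, s)) ≠ 0 then 0 else pvN mat L (i, j, s))
      = prodList (pvW mat L (i, j, s)) := by
    rw [prodList_eq_z_n, pvZ, pvN]
  constructor
  · show (pvBody mat L (d, b, o) i j s).2 = pvG mat L (b, o) (i, j, s)
    unfold pvBody
    dsimp only
    rw [hzn]
    dsimp only
    rw [hp, pvG]
    by_cases hgt : prodList (pvW mat L (i, j, s)) > b <;> simp [hgt]
  · unfold pvBody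
    dsimp only
    rw [hzn]
    dsimp only
    intro key zn hkey
    have hkey' : ((d.insert (i, j, s) (pvZ mat L (i, j, s), pvN mat L (i, j, s))).get? key = some zn) := by
      by_cases hgt : (if (pvZ mat L (i, j, s)) ≠ 0 then 0 else pvN mat L (i, j, s)) > b <;>
        simp only [if_pos, hgt, ite_false] at hkey <;> exact hkey
    rw [PySem.Dict.get?_insert] at hkey'
    by_cases hk : key = (i, j, s)
    · rw [if_pos hk] at hkey'
      cases hkey'
      rw [hk]
    · rw [if_neg hk] at hkey'
      exact hI _ _ hkey'

-- B's nested fold projects to the pvG fold over pvKeys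
theorem B_proj (mat : List (List Int)) (L : Int) (hL : 1 ≤ L) :
    ((PySem.List.pyRange 0 ((mat.length : Int) - L + 1) 1).foldl (fun st i =>
      (PySem.List.pyRange (L - 1) (((mat.headD []).length : Int) - L + 1) 1).foldl (fun st j =>
        ([1, -1] : List Int).foldl (fun st s => pvBody mat L st i j s) st) st)
      ((PySem.Dict.empty : PySem.Dict (Int × Int × Int) (Int × Int)), (0 : Int),
       (none : Option (Int × Int × Int)))).2
    = (pvKeys mat L).foldl (pvG mat L) (0, none) := by
  have hs : ∀ (i j : Int) st, pvInv mat L st →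
      (( ([1, -1] : List Int).foldl (fun st s => pvBody mat L st i j s) st).2
        = ([1, -1] : List Int).foldl (fun pr s => pvG mat L pr (i, j, s)) st.2) ∧
      pvInv mat L (([1, -1] : List Int).foldl (fun st s => pvBody mat L st i j s) st) := by
    intro i j st hst
    exact foldl_proj_inv (fun st => st.2) (pvInv mat L)
      (fun st s => pvBody mat L st i j s) (fun pr s => pvG mat L pr (i, j, s))
      (fun st s h => (body_proj mat L hL i j s st h).2)
      (fun st s h => (body_proj mat L hL i j s st h).1) _ st hst
  have hj : ∀ (i : Int) st, pvInv mat L st →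
      (((PySem.List.pyRange (L - 1) (((mat.headD []).length : Int) - L + 1) 1).foldl (fun st j =>
          ([1, -1] : List Int).foldl (fun st s => pvBody mat L st i j s) st) st).2
        = (PySem.List.pyRange (L - 1) (((mat.headD []).length : Int) - L + 1) 1).foldl (fun pr j =>
            ([1, -1] : List Int).foldl (fun pr s => pvG mat L pr (i, j, s)) pr) st.2) ∧
      pvInv mat L ((PySem.List.pyRange (L - 1) (((mat.headD []).length : Int) - L + 1) 1).foldl
        (fun st j => ([1, -1] : List Int).foldl (fun st s => pvBody mat L st i j s) st) st) := by
    intro i st hst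
    exact foldl_proj_inv (fun st => st.2) (pvInv mat L)
      (fun st j => ([1, -1] : List Int).foldl (fun st s => pvBody mat L st i j s) st)
      (fun pr j => ([1, -1] : List Int).foldl (fun pr s => pvG mat L pr (i, j, s)) pr)
      (fun st j h => (hs i j st h).2) (fun st j h => (hs i j st h).1) _ st hst
  have hi := foldl_proj_inv (fun st => st.2) (pvInv mat L)
      (fun st i => (PySem.List.pyRange (L - 1) (((mat.headD []).length : Int) - L + 1) 1).foldl
        (fun st j => ([1, -1] : List Int).foldl (fun st s => pvBody mat L st i j s) st) st)
      (fun pr i => (PySem.List.pyRange (L - 1) (((mat.headD []).length : Int) - L + 1) 1).foldl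
        (fun pr j => ([1, -1] : List Int).foldl (fun pr s => pvG mat L pr (i, j, s)) pr) pr)
      (fun st i h => (hj i st h).2) (fun st i h => (hj i st h).1)
      (PySem.List.pyRange 0 ((mat.length : Int) - L + 1) 1)
      ((PySem.Dict.empty : PySem.Dict (Int × Int × Int) (Int × Int)), (0 : Int),
       (none : Option (Int × Int × Int)))
      (by intro key zn h; simp [PySem.Dict.get?_empty] at h)
  have h1 := hi.1
  dsimp only at h1
  rw [h1]
  rw [pvKeys, foldl_flatMap']
  simp only [foldl_flatMap']
  rfl

theorem cols_eq (mat : List (List Int)) :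
    (if mat = [] then (0 : Int) else ((mat.headD []).length : Int)) = ((mat.headD []).length : Int) := by
  cases mat <;> simp

theorem main_eq (mat : List (List Int)) (L : Int) (hL : 1 ≤ L) :
    searchDiag mat L = searchDiag_alt mat L := by
  rw [A_eq_step_fold mat L hL]
  unfold searchDiag_alt
  dsimp only
  rw [cols_eq]
  have hbody : (fun (st : PySem.Dict (Int × Int × Int) (Int × Int) × Int × Option (Int × Int × Int)) (i : Int) =>
      (PySem.List.pyRange (L - 1) (((mat.headD []).length : Int) - L + 1) 1).foldl (fun st j =>
        ([1, -1] : List Int).foldl (fun st s => pvBody mat L st i j s) st) st)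
      = (fun st i =>
      (PySem.List.pyRange (L - 1) (((mat.headD []).length : Int) - L + 1) 1).foldl (fun st j =>
        ([1, -1] : List Int).foldl (fun st s =>
          let (state, best, bestpos) := st
          let (z, nz) :=
            match state.get? (i - 1, j - s, s) with
            | none =>
              (PySem.List.pyRange 0 L 1).foldl (fun (p : Int × Int) k =>
                let x := PySem.List.pyGetD (PySem.List.pyGetD mat (i + k) []) (j + s * k) 0
                if x = 0 then (p.1 + 1, p.2) else (p.1, p.2 * x)) ((0 : Int), (1 : Int))
            | some zn =>
              let x := PySem.List.pyGetD (PySem.List.pyGetD mat (i - 1) []) (j - s) 0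
              let (z, nz) := if x = 0 then (zn.1 - 1, zn.2) else (zn.1, PySem.Int.floordiv zn.2 x)
              let y := PySem.List.pyGetD (PySem.List.pyGetD mat (i + L - 1) []) (j + s * (L - 1)) 0
              if y = 0 then (z + 1, nz) else (z, nz * y)
          let state := state.insert (i, j, s) (z, nz)
          let p := if z ≠ 0 then 0 else nz
          if p > best then (state, p, some (i, j, s)) else (state, best, bestpos)) st) st) := by
    rfl
  rw [← hbody]
  have hB := B_proj mat L hL
  rw [cands_eq_map_keys, pair_fold mat L (pvKeys mat L) 0 none [] rfl]
  rw [← hB]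
  cases hres : ((PySem.List.pyRange 0 ((mat.length : Int) - L + 1) 1).foldl (fun st i =>
      (PySem.List.pyRange (L - 1) (((mat.headD []).length : Int) - L + 1) 1).foldl (fun st j =>
        ([1, -1] : List Int).foldl (fun st s => pvBody mat L st i j s) st) st)
      ((PySem.Dict.empty : PySem.Dict (Int × Int × Int) (Int × Int)), (0 : Int),
       (none : Option (Int × Int × Int)))).2.2 with
  | none => simp
  | some pos => rfl

-- ===== VERDICT (by name: the statement is the Claim_ definition above) =====
theorem searchDiag_spec : Claim_equal_searchDiag := by
  intro mat length _ hpre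
  unfold Spec_searchDiag
  exact main_eq mat length hpre.1
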